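-- pv_equiv track=rewrite | github.com/DrJinHoChoi/IronDome-DOA-Tracking | cortex_m7/sim_doa_speech.py | dot_line
-- ===== SOURCE A (Python) =====
-- W = 70
--
-- def dot_line(doas):
--     line = list('-' * W)
--     c = W // 2
--     line[c] = '|'
--     for doa in doas:
--         pos = int(c + doa * c / 90)
--         pos = max(0, min(W-1, pos))
--         line[pos] = 'O'
--     return f"       |{''.join(line)}|"
-- ===== SOURCE B (Python) =====
-- W = 70
--
-- def dot_line(doas):
--     c = W // 2
--     marks = {max(0, min(W - 1, int(c + doa * c / 90))) for doa in doas}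
--     body = ''.join('O' if i in marks else '|' if i == c else '-' for i in range(W))
--     return f"       |{body}|"
-- ===== Notes on version B (the rewrite author's own statement) =====
-- stated objective: alternative
-- what changed: Instead of mutating a prefilled character list marker-by-marker, B first collects the clamped marker positions into a set and then builds the line in one comprehension over range(W), choosing 'O'/'|'/'-' per index.
import Mathlib
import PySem

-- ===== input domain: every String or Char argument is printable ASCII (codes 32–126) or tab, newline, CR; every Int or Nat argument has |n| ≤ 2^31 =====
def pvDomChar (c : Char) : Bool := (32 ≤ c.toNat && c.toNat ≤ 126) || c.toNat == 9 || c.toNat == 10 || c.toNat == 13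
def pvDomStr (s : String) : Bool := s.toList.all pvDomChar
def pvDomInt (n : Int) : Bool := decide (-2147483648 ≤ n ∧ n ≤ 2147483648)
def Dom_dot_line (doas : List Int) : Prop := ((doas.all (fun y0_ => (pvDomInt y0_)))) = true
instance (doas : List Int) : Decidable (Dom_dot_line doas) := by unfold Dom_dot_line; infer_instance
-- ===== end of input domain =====

-- B builds the marker-position set first and then renders the line in one pass over range(W),
-- instead of A's in-place overwriting of a prefilled character list (objective: alternative decomposition).

-- ===== PORT A =====
-- `int(c + doa * c / 90)` is ported as truncating integer division of the exact rational
-- (c*90 + doa*c)/90: exact on Dom (|doa| ≤ 2^31, so the double computation never rounds across an integer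
-- for non-multiples, and truncation toward zero is Int.tdiv).
def dot_line (doas : List Int) : String :=
  let line : List Char := List.replicate 70 '-'
  let c : Int := 70 / 2
  let line := PySem.List.pySetD line c '|'
  let line := doas.foldl (fun l doa =>
    let pos : Int := Int.tdiv (c * 90 + doa * c) 90
    let pos := max 0 (min (70 - 1) pos)
    PySem.List.pySetD l pos 'O') line
  "       |" ++ String.mk line ++ "|"

-- ===== PORT B =====
-- the clamped marker position of one DOA angle (B's `max(0, min(W-1, int(c + doa*c/90)))`, same exactness note as in port A)
def altPos (doa : Int) : Int := max 0 (min (70 - 1) (Int.tdiv (35 * 90 + doa * 35) 90))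

def dot_line_alt (doas : List Int) : String :=
  let marks : PySem.Set Int := PySem.Set.ofList (doas.map altPos)
  let body : List Char := (PySem.List.pyRange 0 70 1).map (fun i =>
    if i ∈ marks then 'O' else if i = 35 then '|' else '-')
  "       |" ++ String.mk body ++ "|"

-- ===== PRECONDITION & SPEC =====
def Spec_dot_line (doas : List Int) (out : String) : Prop := out = dot_line_alt doas
instance (doas : List Int) (out : String) : Decidable (Spec_dot_line doas out) := by unfold Spec_dot_line; infer_instance

-- ===== CLAIM (what is proved, stated in full; the proofs are below) =====
def Claim_equal_dot_line : Prop := ∀ (doas : List Int), Dom_dot_line doas → Spec_dot_line doas (dot_line doas)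

-- ===== LEMMAS AND PROOFS =====

theorem altPos_bounds (d : Int) : 0 ≤ altPos d ∧ altPos d ≤ 69 := by
  unfold altPos; omega

-- A's fold step, with pySetD resolved to List.set at the (nonnegative, in-range) clamped position
theorem fold_step_eq (l : List Char) (doa : Int) :
    PySem.List.pySetD l (max 0 (min (70 - 1) (Int.tdiv (35 * 90 + doa * 35) 90))) 'O'
      = l.set (altPos doa).toNat 'O' := by
  rw [PySem.List.pySetD_of_nonneg]
  · rfl
  · have := altPos_bounds doa; unfold altPos at this; omega

-- the characteristic of A's fold: position i holds 'O' iff some doa maps there, else the initial char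
theorem foldl_set_getElem? (doas : List Int) (l : List Char) (hl : l.length = 70) (i : Nat) :
    (doas.foldl (fun acc d => acc.set (altPos d).toNat 'O') l)[i]?
      = if i ∈ doas.map (fun d => (altPos d).toNat) then some 'O' else l[i]? := by
  induction doas generalizing l with
  | nil => simp
  | cons d ds ih =>
    have hlen : ((l.set (altPos d).toNat 'O').length = 70) := by simp [hl]
    rw [List.foldl_cons, ih _ hlen]
    by_cases hmem : i ∈ ds.map (fun d => (altPos d).toNat)
    · simp [hmem]
    · have hb := altPos_bounds d
      rw [List.getElem?_set]
      by_cases hd : (altPos d).toNat = i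
      · simp [hmem, hd, hl]; omega
      · simp [hmem, hd]
        intro x
        exact absurd x.symm hd

theorem length_fold (doas : List Int) (l : List Char) :
    (doas.foldl (fun acc d => acc.set (altPos d).toNat 'O') l).length = l.length := by
  induction doas generalizing l with
  | nil => rfl
  | cons d ds ih => simp [List.foldl_cons, ih]

-- membership translation between B's Int marks and A's Nat positions
theorem mem_marks_iff (doas : List Int) (i : Nat) :
    ((i : Int) ∈ PySem.Set.ofList (doas.map altPos))
      ↔ i ∈ doas.map (fun d => (altPos d).toNat) := by
  rw [PySem.Set.mem_ofList]
  simp only [List.mem_map]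
  constructor
  · rintro ⟨d, hd, h⟩
    exact ⟨d, hd, by omega⟩
  · rintro ⟨d, hd, h⟩
    have := altPos_bounds d
    exact ⟨d, hd, by omega⟩

theorem body_eq (doas : List Int) :
    (doas.foldl (fun acc d => acc.set (altPos d).toNat 'O')
        ((List.replicate 70 '-').set 35 '|'))
      = (PySem.List.pyRange 0 70 1).map (fun i =>
          if i ∈ PySem.Set.ofList (doas.map altPos) then 'O' else if i = 35 then '|' else '-') := by
  set l0 : List Char := (List.replicate 70 '-').set 35 '|' with hl0
  have hlen0 : l0.length = 70 := by simp [hl0]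
  apply List.ext_getElem?
  intro i
  by_cases hi : i < 70
  · have hp := PySem.List.getElem?_map_pyRange_zero (fun j : Int =>
        if j ∈ PySem.Set.ofList (doas.map altPos) then 'O' else if j = 35 then '|' else '-') 70 i hi
    simp only [Nat.cast_ofNat] at hp
    rw [foldl_set_getElem? doas l0 hlen0 i, hp]
    by_cases hmem : i ∈ doas.map (fun d => (altPos d).toNat)
    · rw [if_pos hmem, if_pos ((mem_marks_iff doas i).2 hmem)]
    · rw [if_neg hmem, if_neg (fun h => hmem ((mem_marks_iff doas i).1 h))]
      by_cases h35 : i = 35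
      · subst h35
        simp [hl0]
      · have hni : ¬ ((i : Int) = 35) := by omega
        rw [if_neg hni, hl0, List.getElem?_set]
        simp only [List.getElem?_replicate]
        simp [Ne.symm h35, hi]
  · have h1 : (doas.foldl (fun acc d => acc.set (altPos d).toNat 'O') l0).length ≤ i := by
      rw [length_fold, hlen0]; omega
    have h2 : ((PySem.List.pyRange 0 70 1).map (fun i : Int =>
          if i ∈ PySem.Set.ofList (doas.map altPos) then 'O' else if i = 35 then '|' else '-')).length ≤ i := by
      rw [List.length_map, PySem.List.length_pyRange_one]; omega
    rw [List.getElem?_eq_none h1, List.getElem?_eq_none h2]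

-- ===== VERDICT (by name: the statement is the Claim_ definition above) =====
theorem dot_line_spec : Claim_equal_dot_line := by
  intro doas _
  show dot_line doas = dot_line_alt doas
  dsimp only [dot_line, dot_line_alt]
  simp only [show ((70:Int)/2) = 35 from by norm_num]
  rw [show (fun (l : List Char) (doa : Int) =>
        PySem.List.pySetD l (max 0 (min (70 - 1) (Int.tdiv (35 * 90 + doa * 35) 90))) 'O')
      = (fun (l : List Char) (doa : Int) => l.set (altPos doa).toNat 'O')
      from funext fun l => funext fun doa => fold_step_eq l doa]
  rw [PySem.List.pySetD_of_nonneg (List.replicate 70 '-') '|' (by norm_num : (0:Int) ≤ 35)]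
  rw [show ((35:Int).toNat) = 35 from rfl, body_eq]
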